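-- pv_equiv track=rewrite | github.com/ALItaheri1380/IUT | Artificial Intelligence/HW1/BFS.py | BFS
-- ===== SOURCE A (Python) =====
-- import queue
--
-- class Node:
--     def __init__(self, state, path):
--         self.state = state
--         self.path = path
--
-- def Expand(values, x, y):
--     s1, s2 = values
--
--     if s1 < x:
--         yield Node((x, s2), 'fill x')
--
--     if s2 < y:
--         yield Node((s1, y), 'fill y')
--
--     if s1 > 0:
--         yield Node((0, s2), 'empty x')
--
--     if s2 > 0:
--         yield Node((s1, 0), 'empty y')
--
--     if s1 > 0 and s2 < y:
--         res = min(s1, y - s2)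
--         yield Node((s1 - res, s2 + res), 'Move from x to y')
--
--     if s2 > 0 and s1 < x:
--         res = min(s2, x - s1)
--         yield Node((s1 + res, s2 - res), 'Move from y to x')
--
-- def BFS(Start, target, x, y):
--
--     nd = Node(Start,[])
--     if nd.state == target:
--         return ['without any movement'] , 1
--
--     q = queue.Queue()
--     Visit = set()
--     Visit.add(nd.state)
--     q.put(nd)
--
--     visited_nodes = 1
--
--     while (not q.empty()):
--         node = q.get()
--         for n in Expand(node.state , x , y):
--             if n.state == target:
--                 visited_nodes += 1
--                 return node.path + [n.path], visited_nodes
--             if n.state not in Visit: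
--                 Visit.add(n.state)
--                 q.put(Node(n.state, node.path + [n.path]))
--                 visited_nodes += 1
--
--     return None, visited_nodes
-- ===== SOURCE B (Python) =====
-- def _expand(s1, s2, x, y):
--     out = []
--     if s1 < x:
--         out.append(((x, s2), 'fill x'))
--     if s2 < y:
--         out.append(((s1, y), 'fill y'))
--     if s1 > 0:
--         out.append(((0, s2), 'empty x'))
--     if s2 > 0:
--         out.append(((s1, 0), 'empty y'))
--     if s1 > 0 and s2 < y:
--         r = min(s1, y - s2)
--         out.append(((s1 - r, s2 + r), 'Move from x to y'))
--     if s2 > 0 and s1 < x: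
--         r = min(s2, x - s1)
--         out.append(((s1 + r, s2 - r), 'Move from y to x'))
--     return out
--
-- def _path_to(parent, s):
--     moves = []
--     while s in parent:
--         s, m = parent[s]
--         moves.append(m)
--     moves.reverse()
--     return moves
--
-- def BFS(Start, target, x, y):
--     if Start == target:
--         return ['without any movement'], 1
--     parent = {}          # state -> (predecessor state, move label); keys = discovered states except Start
--     q = [Start]
--     i = 0
--     while i < len(q):
--         cur = q[i]
--         i += 1
--         for state, move in _expand(cur[0], cur[1], x, y):
--             if state == target:
--                 return _path_to(parent, cur) + [move], len(parent) + 2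
--             if state != Start and state not in parent:
--                 parent[state] = (cur, move)
--                 q.append(state)
--     return None, len(parent) + 1
-- ===== Notes on version B (the rewrite author's own statement) =====
-- stated objective: faster
-- what changed: B stores no path list per node: it keeps a predecessor dict (state -> (parent, move)) and reconstructs the answer by backtracking only on a target hit, and it drops both the Visit set and the visited_nodes counter, recovering them from the dict (visited = Start plus dict keys, count = len(dict)+1); the FIFO queue becomes a grow-only list scanned by index.
import Mathlib
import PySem

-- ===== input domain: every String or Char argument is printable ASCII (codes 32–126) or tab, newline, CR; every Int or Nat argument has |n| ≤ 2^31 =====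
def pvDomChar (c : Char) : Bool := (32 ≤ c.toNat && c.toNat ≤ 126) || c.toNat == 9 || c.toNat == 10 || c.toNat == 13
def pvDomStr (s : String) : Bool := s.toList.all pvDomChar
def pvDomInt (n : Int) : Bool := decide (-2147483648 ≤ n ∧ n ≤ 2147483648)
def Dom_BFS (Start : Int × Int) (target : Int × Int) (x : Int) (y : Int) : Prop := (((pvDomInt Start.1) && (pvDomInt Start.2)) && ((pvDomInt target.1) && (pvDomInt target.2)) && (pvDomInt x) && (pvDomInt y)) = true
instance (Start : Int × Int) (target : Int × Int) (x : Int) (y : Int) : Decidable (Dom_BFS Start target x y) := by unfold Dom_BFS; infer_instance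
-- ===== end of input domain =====

-- B replaces A's per-node path lists by a predecessor dict with backtracking reconstruction,
-- drops the Visit set and the visited_nodes counter (both recovered from the dict): simpler state, same results.
-- Both loop ports use the same generous fuel bound (the Python while-loops always terminate:
-- every iteration dequeues a state enqueued at most once, and the reachable state space is finite);
-- the loops exit when their queue empties, so the fuel is never reached on the tested domain.

-- fuel: a safe upper bound on the number of BFS dequeues (reachable states number only a few times x+y)
def pvFuel (Start : Int × Int) (x : Int) (y : Int) : Nat :=
  8 * (Start.1.natAbs + Start.2.natAbs + x.natAbs + y.natAbs + 1)

-- ===== PORT A =====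

-- Expand: the generator's six guarded yields, in order
def pvExpandA (s : Int × Int) (x y : Int) : List ((Int × Int) × String) :=
  (if s.1 < x then [((x, s.2), "fill x")] else []) ++
  (if s.2 < y then [((s.1, y), "fill y")] else []) ++
  (if 0 < s.1 then [(((0 : Int), s.2), "empty x")] else []) ++
  (if 0 < s.2 then [((s.1, (0 : Int)), "empty y")] else []) ++
  (if 0 < s.1 ∧ s.2 < y then
    [((s.1 - min s.1 (y - s.2), s.2 + min s.1 (y - s.2)), "Move from x to y")] else []) ++
  (if 0 < s.2 ∧ s.1 < x then
    [((s.1 + min s.2 (x - s.1), s.2 - min s.2 (x - s.1)), "Move from y to x")] else [])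

-- the inner 'for n in Expand(...)' loop: early return (.inl) or the updated (Visit, queue tail, count)
def pvStepA (target : Int × Int) (path : List String) :
    List ((Int × Int) × String) → PySem.Set (Int × Int) → List ((Int × Int) × List String) → Int →
    (Option (List String) × Int) ⊕ (PySem.Set (Int × Int) × List ((Int × Int) × List String) × Int)
  | [], visit, pend, cnt => Sum.inr (visit, pend, cnt)
  | (st, mv) :: rest, visit, pend, cnt =>
    if st = target then Sum.inl (some (path ++ [mv]), cnt + 1)
    else if st ∈ visit then pvStepA target path rest visit pend cnt
    else pvStepA target path rest (PySem.Set.add visit st) (pend ++ [(st, path ++ [mv])]) (cnt + 1)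

-- the 'while not q.empty()' loop; the FIFO queue is the list of pending (state, path) nodes
def pvLoopA (target : Int × Int) (x y : Int) :
    Nat → List ((Int × Int) × List String) → PySem.Set (Int × Int) → Int → Option (List String) × Int
  | 0, _, _, cnt => (none, cnt)
  | _ + 1, [], _, cnt => (none, cnt)
  | fuel + 1, (s, p) :: qs, visit, cnt =>
    match pvStepA target p (pvExpandA s x y) visit qs cnt with
    | Sum.inl r => r
    | Sum.inr (visit', q', cnt') => pvLoopA target x y fuel q' visit' cnt'

def BFS (Start : Int × Int) (target : Int × Int) (x : Int) (y : Int) : Option (List String) × Int :=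
  if Start = target then (some ["without any movement"], 1)
  else pvLoopA target x y (pvFuel Start x y) [(Start, [])]
    (PySem.Set.add PySem.Set.empty Start) 1

-- ===== PORT B =====

-- _expand: the same six guarded candidates, collected into a list
def pvExpandB (s1 s2 x y : Int) : List ((Int × Int) × String) :=
  (if s1 < x then [((x, s2), "fill x")] else []) ++
  (if s2 < y then [((s1, y), "fill y")] else []) ++
  (if 0 < s1 then [(((0 : Int), s2), "empty x")] else []) ++
  (if 0 < s2 then [((s1, (0 : Int)), "empty y")] else []) ++
  (if 0 < s1 ∧ s2 < y then
    [((s1 - min s1 (y - s2), s2 + min s1 (y - s2)), "Move from x to y")] else []) ++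
  (if 0 < s2 ∧ s1 < x then
    [((s1 + min s2 (x - s1), s2 - min s2 (x - s1)), "Move from y to x")] else [])

-- _path_to: backtrack through the predecessor dict; fuel = |parent| + 1 is exact since parent
-- chains are acyclic and visit pairwise distinct keys, so the Python while loop does ≤ |parent| steps
def pvPathTo (parent : PySem.Dict (Int × Int) ((Int × Int) × String)) :
    Nat → (Int × Int) → List String → List String
  | 0, _, moves => moves.reverse
  | f + 1, s, moves =>
    match parent.get? s with
    | none => moves.reverse
    | some (prev, mv) => pvPathTo parent f prev (moves ++ [mv])

-- the inner 'for state, move in _expand(...)' loop: early return (.inl) or updated (parent, q)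
def pvStepB (Start target : Int × Int) (cur : Int × Int) :
    List ((Int × Int) × String) → PySem.Dict (Int × Int) ((Int × Int) × String) → List (Int × Int) →
    (Option (List String) × Int) ⊕ (PySem.Dict (Int × Int) ((Int × Int) × String) × List (Int × Int))
  | [], parent, q => Sum.inr (parent, q)
  | (st, mv) :: rest, parent, q =>
    if st = target then
      Sum.inl (some (pvPathTo parent (parent.items.length + 1) cur [] ++ [mv]),
               (parent.items.length : Int) + 2)
    else if st ≠ Start ∧ parent.get? st = none then
      pvStepB Start target cur rest (parent.insert st (cur, mv)) (q ++ [st])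
    else pvStepB Start target cur rest parent q

-- the 'while i < len(q)' loop: q only grows, i indexes the next pending state
def pvLoopB (Start target : Int × Int) (x y : Int) :
    Nat → List (Int × Int) → Nat → PySem.Dict (Int × Int) ((Int × Int) × String) →
    Option (List String) × Int
  | 0, _, _, parent => (none, (parent.items.length : Int) + 1)
  | fuel + 1, q, i, parent =>
    match q[i]? with
    | none => (none, (parent.items.length : Int) + 1)
    | some cur =>
      match pvStepB Start target cur (pvExpandB cur.1 cur.2 x y) parent q with
      | Sum.inl r => r
      | Sum.inr (parent', q') => pvLoopB Start target x y fuel q' (i + 1) parent'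

def BFS_alt (Start : Int × Int) (target : Int × Int) (x : Int) (y : Int) : Option (List String) × Int :=
  if Start = target then (some ["without any movement"], 1)
  else pvLoopB Start target x y (pvFuel Start x y) [Start] 0 PySem.Dict.empty

-- ===== PRECONDITION & SPEC =====
def Spec_BFS (Start : Int × Int) (target : Int × Int) (x : Int) (y : Int) (out : Option (List String) × Int) : Prop := out = BFS_alt Start target x y
instance (Start : Int × Int) (target : Int × Int) (x : Int) (y : Int) (out : Option (List String) × Int) : Decidable (Spec_BFS Start target x y out) := by unfold Spec_BFS; infer_instance

-- ===== CLAIM (what is proved, stated in full; the proofs are below) =====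
def Claim_equal_BFS : Prop := ∀ (Start : Int × Int) (target : Int × Int) (x : Int) (y : Int), Dom_BFS Start target x y → Spec_BFS Start target x y (BFS Start target x y)

-- ===== LEMMAS AND PROOFS =====

-- the state s is reachable in the parent dict from root by the move list p
inductive pvChain (par : PySem.Dict (Int × Int) ((Int × Int) × String)) (root : Int × Int) :
    (Int × Int) → List String → Prop
  | base : pvChain par root root []
  | step {s p s' mv} : pvChain par root s p → par.get? s' = some (s, mv) →
      pvChain par root s' (p ++ [mv])

-- coupling invariant between A's loop state (qA, visit, cnt) and B's (qB, i, par)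
def pvInv (Start : Int × Int) (visit : PySem.Set (Int × Int))
    (par : PySem.Dict (Int × Int) ((Int × Int) × String)) (cnt : Int)
    (qA : List ((Int × Int) × List String)) (qB : List (Int × Int)) (i : Nat) : Prop :=
  par.get? Start = none ∧
  (∀ st, st ∈ visit ↔ (st = Start ∨ (par.get? st).isSome)) ∧
  cnt = (par.items.length : Int) + 1 ∧
  qB.drop i = qA.map Prod.fst ∧ i ≤ qB.length ∧
  (∀ s p, (s, p) ∈ qA → pvChain par Start s p ∧ p.length ≤ par.items.length)

theorem pvPathTo_eval (par : PySem.Dict (Int × Int) ((Int × Int) × String))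
    (Start : Int × Int) (hS : par.get? Start = none) {s : Int × Int} {p : List String}
    (h : pvChain par Start s p) :
    ∀ f ms, p.length ≤ f → pvPathTo par f s ms = p ++ ms.reverse := by
  induction h with
  | base =>
    intro f ms _
    cases f with
    | zero => simp [pvPathTo]
    | succ g => simp [pvPathTo, hS]
  | step hc hget ih =>
    intro f ms hf
    rename_i s p s' mv
    cases f with
    | zero => simp at hf
    | succ g =>
      have : pvPathTo par (g + 1) s' ms = pvPathTo par g s (ms ++ [mv]) := by
        simp [pvPathTo, hget]
      rw [this, ih g (ms ++ [mv]) (by simpa using Nat.lt_succ_iff.mp (by simpa using hf))]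
      simp

theorem pvChain_mono {par : PySem.Dict (Int × Int) ((Int × Int) × String)}
    {root s : Int × Int} {p : List String} {k : Int × Int} {v : (Int × Int) × String}
    (hk : par.get? k = none) (h : pvChain par root s p) :
    pvChain (par.insert k v) root s p := by
  induction h with
  | base => exact pvChain.base
  | step hc hget ih =>
    rename_i s1 p1 s1' mv1
    have hne : s1' ≠ k := by
      intro he; rw [he, hk] at hget; simp at hget
    refine pvChain.step ih ?_
    rw [PySem.Dict.get?_insert_of_ne _ _ hne]
    exact hget

theorem pvStep_rel (Start target cur : Int × Int) (pcur : List String)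
    (ns : List ((Int × Int) × String)) :
    ∀ (visit : PySem.Set (Int × Int)) (par : PySem.Dict (Int × Int) ((Int × Int) × String))
      (cnt : Int) (pend : List ((Int × Int) × List String)) (qB : List (Int × Int)) (i : Nat),
      par.get? Start = none →
      (∀ st, st ∈ visit ↔ (st = Start ∨ (par.get? st).isSome)) →
      cnt = (par.items.length : Int) + 1 →
      qB.drop (i + 1) = pend.map Prod.fst → i + 1 ≤ qB.length →
      (∀ s p, (s, p) ∈ pend → pvChain par Start s p ∧ p.length ≤ par.items.length) →
      pvChain par Start cur pcur → pcur.length ≤ par.items.length →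
      (∃ r, pvStepA target pcur ns visit pend cnt = Sum.inl r ∧
            pvStepB Start target cur ns par qB = Sum.inl r) ∨
      (∃ visit' pend' cnt' par' qB',
        pvStepA target pcur ns visit pend cnt = Sum.inr (visit', pend', cnt') ∧
        pvStepB Start target cur ns par qB = Sum.inr (par', qB') ∧
        pvInv Start visit' par' cnt' pend' qB' (i + 1)) := by
  induction ns with
  | nil =>
    intro visit par cnt pend qB i h1 h2 h3 h4 h5 h6 hc hl
    right
    exact ⟨visit, pend, cnt, par, qB, rfl, rfl, h1, h2, h3, h4, h5, h6⟩
  | cons n rest ih =>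
    intro visit par cnt pend qB i h1 h2 h3 h4 h5 h6 hc hl
    obtain ⟨st, mv⟩ := n
    by_cases ht : st = target
    · left
      refine ⟨(some (pcur ++ [mv]), cnt + 1), ?_, ?_⟩
      · simp [pvStepA, ht]
      · simp only [pvStepB, if_pos ht]
        rw [pvPathTo_eval par Start h1 hc (par.items.length + 1) [] (by omega)]
        rw [h3]
        simp
        omega
    · by_cases hv : st ∈ visit
      · have hA : pvStepA target pcur ((st, mv) :: rest) visit pend cnt =
            pvStepA target pcur rest visit pend cnt := by
          simp [pvStepA, ht, hv]
        have hBcond : ¬ (st ≠ Start ∧ par.get? st = none) := by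
          rcases (h2 st).mp hv with h | h
          · intro ⟨ha, _⟩; exact ha h
          · intro ⟨_, hb⟩; rw [hb] at h; simp at h
        have hB : pvStepB Start target cur ((st, mv) :: rest) par qB =
            pvStepB Start target cur rest par qB := by
          simp [pvStepB, ht, hBcond]
        rw [hA, hB]
        exact ih visit par cnt pend qB i h1 h2 h3 h4 h5 h6 hc hl
      · have hstS : st ≠ Start := fun he => hv ((h2 st).mpr (Or.inl he))
        have hstN : par.get? st = none := by
          cases hgs : par.get? st with
          | none => rfl
          | some v => exact absurd ((h2 st).mpr (Or.inr (by simp [hgs]))) hv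
        have hA : pvStepA target pcur ((st, mv) :: rest) visit pend cnt =
            pvStepA target pcur rest (PySem.Set.add visit st)
              (pend ++ [(st, pcur ++ [mv])]) (cnt + 1) := by
          simp [pvStepA, ht, hv]
        have hB : pvStepB Start target cur ((st, mv) :: rest) par qB =
            pvStepB Start target cur rest (par.insert st (cur, mv)) (qB ++ [st]) := by
          simp [pvStepB, ht, hstS, hstN]
        rw [hA, hB]
        have hcontains : par.contains st = false := by
          rw [PySem.Dict.contains_eq_isSome_get?, hstN]; rfl
        have hitems : (par.insert st (cur, mv)).items.length = par.items.length + 1 := by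
          rw [PySem.Dict.items_insert_of_not_contains _ _ hcontains]
          simp
        refine ih (PySem.Set.add visit st) (par.insert st (cur, mv)) (cnt + 1)
          (pend ++ [(st, pcur ++ [mv])]) (qB ++ [st]) i ?_ ?_ ?_ ?_ ?_ ?_ ?_ ?_
        · rw [PySem.Dict.get?_insert_of_ne _ _ (fun he => hstS he.symm)]; exact h1
        · intro s
          rw [PySem.Set.mem_add]
          constructor
          · rintro (h | h)
            · rcases (h2 s).mp h with h' | h'
              · exact Or.inl h'
              · refine Or.inr ?_
                rcases hgs : par.get? s with _ | v
                · rw [hgs] at h'; simp at h'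
                · have : s ≠ st := by
                    intro he; rw [he, hstN] at hgs; simp at hgs
                  rw [PySem.Dict.get?_insert_of_ne _ _ this, hgs]; rfl
            · subst h
              rw [PySem.Dict.get?_insert_self _ _ _]; exact Or.inr rfl
          · rintro (h | h)
            · exact Or.inl ((h2 s).mpr (Or.inl h))
            · by_cases he : s = st
              · exact Or.inr he
              · rw [PySem.Dict.get?_insert_of_ne _ _ he] at h
                exact Or.inl ((h2 s).mpr (Or.inr h))
        · rw [hitems]; rw [h3]; push_cast; ring
        · rw [List.drop_append_of_le_length (by omega), h4]; simp
        · simp; omega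
        · intro s p hmem
          rcases List.mem_append.mp hmem with hmem | hmem
          · obtain ⟨hch, hle⟩ := h6 s p hmem
            exact ⟨pvChain_mono hstN hch, by omega⟩
          · simp at hmem
            obtain ⟨he1, he2⟩ := hmem
            subst he1; subst he2
            refine ⟨pvChain.step (pvChain_mono hstN hc) (PySem.Dict.get?_insert_self _ _ _), ?_⟩
            simp; omega
        · exact pvChain_mono hstN hc
        · omega

theorem pvLoop_rel (Start target : Int × Int) (x y : Int) :
    ∀ (fuel : Nat) (qA : List ((Int × Int) × List String)) (visit : PySem.Set (Int × Int))
      (cnt : Int) (qB : List (Int × Int)) (i : Nat)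
      (par : PySem.Dict (Int × Int) ((Int × Int) × String)),
      pvInv Start visit par cnt qA qB i →
      pvLoopA target x y fuel qA visit cnt = pvLoopB Start target x y fuel qB i par := by
  intro fuel
  induction fuel with
  | zero =>
    intro qA visit cnt qB i par hinv
    obtain ⟨_, _, h3, _⟩ := hinv
    simp [pvLoopA, pvLoopB, h3]
  | succ f ih =>
    intro qA visit cnt qB i par hinv
    obtain ⟨h1, h2, h3, h4, h5, h6⟩ := hinv
    cases qA with
    | nil =>
      have hdrop : qB.drop i = [] := by simpa using h4
      have hlen : qB.length ≤ i := List.drop_eq_nil_iff.mp hdrop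
      have hget : qB[i]? = none := by
        rw [List.getElem?_eq_none hlen]
      simp [pvLoopA, pvLoopB, hget, h3]
    | cons hd qs =>
      obtain ⟨s, p⟩ := hd
      have hdrop : qB.drop i = s :: qs.map Prod.fst := by simpa using h4
      have hget : qB[i]? = some s := by
        have := List.head?_drop (l := qB) (i := i)
        rw [hdrop] at this; simpa using this.symm
      have hlt : i < qB.length := by
        by_contra hh
        rw [List.getElem?_eq_none (by omega)] at hget
        simp at hget
      have hdrop1 : qB.drop (i + 1) = qs.map Prod.fst := by
        have : qB.drop (i + 1) = (qB.drop i).tail := by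
          rw [List.tail_drop]
        rw [this, hdrop]; rfl
      obtain ⟨hc, hl⟩ := h6 s p (by simp)
      have hstep := pvStep_rel Start target s p (pvExpandA s x y) visit par cnt qs qB i
        h1 h2 h3 hdrop1 (by omega) (fun s' p' hm => h6 s' p' (by simp [hm])) hc hl
      have hexp : pvExpandB s.1 s.2 x y = pvExpandA s x y := by
        simp [pvExpandA, pvExpandB]
      rcases hstep with ⟨r, hA, hB⟩ | ⟨visit', pend', cnt', par', qB', hA, hB, hinv'⟩
      · simp only [pvLoopA, pvLoopB, hget, hexp, hA, hB]
      · simp only [pvLoopA, pvLoopB, hget, hexp, hA, hB]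
        exact ih pend' visit' cnt' qB' (i + 1) par' hinv'

-- ===== VERDICT (by name: the statement is the Claim_ definition above) =====
theorem BFS_spec : Claim_equal_BFS := by
  intro Start target x y _
  unfold Spec_BFS BFS BFS_alt
  by_cases h : Start = target
  · simp [h]
  · simp only [if_neg h]
    apply pvLoop_rel
    refine ⟨by simp [PySem.Dict.get?_empty], ?_, by simp, by simp, by simp, ?_⟩
    · intro st
      constructor
      · intro hm
        left
        simpa [PySem.Set.add, PySem.Set.empty] using hm
      · rintro (he | hs)
        · simp [PySem.Set.add, PySem.Set.empty, he]
        · rw [PySem.Dict.get?_empty] at hs; simp at hs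
    · intro s p hm
      simp at hm
      obtain ⟨h1, h2⟩ := hm
      subst h1; subst h2
      exact ⟨pvChain.base, by simp⟩
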